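-- pv_equiv track=rewrite | github.com/dopexthrone/MeaningWorks | mother/paradigm_detector.py | classify_failure_patterns
-- ===== SOURCE A (Python) =====
-- from typing import Dict, FrozenSet, List, Tuple
--
-- _SHIFT_CATEGORIES: Dict[str, FrozenSet[str]] = {
--     "technical": frozenset({"rewrite", "refactor", "architecture", "framework", "language", "platform"}),
--     "process": frozenset({"workflow", "pipeline", "methodology", "approach", "strategy", "paradigm"}),
--     "market": frozenset({"pivot", "market", "customer", "audience", "positioning", "segment"}),
--     "capability": frozenset({"limitation", "gap", "missing", "unable", "insufficient", "inadequate"}),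
-- }
--
-- def classify_failure_patterns(failure_reasons: List[str]) -> List[str]:
--     """Categorize failure strings into shift categories.
--
--     Uses keyword intersection with _SHIFT_CATEGORIES.
--     Returns list of category names detected in failure reasons.
--     """
--     if not failure_reasons:
--         return []
--
--     combined = " ".join(r.lower() for r in failure_reasons)
--     words = frozenset(combined.split())
--
--     detected: List[str] = []
--     for category, keywords in _SHIFT_CATEGORIES.items():
--         if words & keywords:
--             detected.append(category)
--
--     return detected
-- ===== SOURCE B (Python) =====
-- from typing import Dict, FrozenSet, List, Tuple
--
-- _SHIFT_CATEGORIES: Dict[str, FrozenSet[str]] = {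
--     "technical": frozenset({"rewrite", "refactor", "architecture", "framework", "language", "platform"}),
--     "process": frozenset({"workflow", "pipeline", "methodology", "approach", "strategy", "paradigm"}),
--     "market": frozenset({"pivot", "market", "customer", "audience", "positioning", "segment"}),
--     "capability": frozenset({"limitation", "gap", "missing", "unable", "insufficient", "inadequate"}),
-- }
--
-- # Inverted index: keyword -> category (keyword sets are pairwise disjoint).
-- _KEYWORD_TO_CATEGORY: Dict[str, str] = {
--     kw: cat for cat, kws in _SHIFT_CATEGORIES.items() for kw in kws
-- }
--
-- def classify_failure_patterns(failure_reasons: List[str]) -> List[str]: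
--     combined = " ".join(r.lower() for r in failure_reasons)
--     detected = set()
--     for word in combined.split():
--         cat = _KEYWORD_TO_CATEGORY.get(word)
--         if cat is not None:
--             detected.add(cat)
--     return [c for c in _SHIFT_CATEGORIES if c in detected]
-- ===== Notes on version B (the rewrite author's own statement) =====
-- stated objective: alternative
-- what changed: Replaces the per-category set-intersection loop by a precomputed inverted index (keyword -> category): one pass over the words collects detected categories, then the fixed category order is filtered.
import Mathlib
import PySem

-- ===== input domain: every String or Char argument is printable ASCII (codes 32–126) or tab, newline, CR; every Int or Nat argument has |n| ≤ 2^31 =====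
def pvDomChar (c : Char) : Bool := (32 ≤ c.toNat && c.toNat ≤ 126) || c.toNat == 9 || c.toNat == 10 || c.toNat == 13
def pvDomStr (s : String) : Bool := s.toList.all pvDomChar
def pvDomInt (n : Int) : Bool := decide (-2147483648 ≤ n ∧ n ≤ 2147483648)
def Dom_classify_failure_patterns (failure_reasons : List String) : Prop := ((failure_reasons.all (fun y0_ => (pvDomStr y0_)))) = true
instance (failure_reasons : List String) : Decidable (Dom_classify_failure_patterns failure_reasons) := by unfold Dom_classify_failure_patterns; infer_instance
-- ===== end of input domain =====

-- B replaces A's per-category set intersections by a precomputed keyword→category inverted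
-- index, one pass over the words and a filter of the fixed category order (alternative).

-- ===== PORT A =====
-- _SHIFT_CATEGORIES, in insertion order; keyword sets as lists (A only tests membership /
-- non-empty intersection, so the frozenset iteration order is irrelevant).
def pvShiftCategories : List (String × List String) :=
  [("technical", ["rewrite", "refactor", "architecture", "framework", "language", "platform"]),
   ("process", ["workflow", "pipeline", "methodology", "approach", "strategy", "paradigm"]),
   ("market", ["pivot", "market", "customer", "audience", "positioning", "segment"]),
   ("capability", ["limitation", "gap", "missing", "unable", "insufficient", "inadequate"])]

def classify_failure_patterns (failure_reasons : List String) : List String :=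
  if failure_reasons = [] then []
  else
    let combined := PySem.Str.join " " (failure_reasons.map (fun r => PySem.Str.lower r))
    let words := PySem.Set.ofList (PySem.Str.split₀ combined)
    pvShiftCategories.foldl
      (fun detected ck =>
        if !(PySem.Set.inter words ck.2).isEmpty then detected ++ [ck.1] else detected)
      []

-- ===== PORT B =====
-- _KEYWORD_TO_CATEGORY: the dict comprehension over _SHIFT_CATEGORIES.
def pvKeywordToCategory : PySem.Dict String String :=
  pvShiftCategories.foldl
    (fun d ck => ck.2.foldl (fun d kw => PySem.Dict.insert d kw ck.1) d) (PySem.Dict.mk [])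

def classify_failure_patterns_alt (failure_reasons : List String) : List String :=
  let combined := PySem.Str.join " " (failure_reasons.map (fun r => PySem.Str.lower r))
  let detected := (PySem.Str.split₀ combined).foldl
    (fun s w =>
      match PySem.Dict.get? pvKeywordToCategory w with
      | some c => PySem.Set.add s c
      | none => s)
    PySem.Set.empty
  (pvShiftCategories.map (fun ck => ck.1)).filter (fun c => PySem.Set.contains detected c)

-- ===== PRECONDITION & SPEC =====
def Spec_classify_failure_patterns (failure_reasons : List String) (out : List String) : Prop := out = classify_failure_patterns_alt failure_reasons
instance (failure_reasons : List String) (out : List String) : Decidable (Spec_classify_failure_patterns failure_reasons out) := by unfold Spec_classify_failure_patterns; infer_instance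

-- ===== CLAIM (what is proved, stated in full; the proofs are below) =====
def Claim_equal_classify_failure_patterns : Prop := ∀ (failure_reasons : List String), Dom_classify_failure_patterns failure_reasons → Spec_classify_failure_patterns failure_reasons (classify_failure_patterns failure_reasons)

-- ===== LEMMAS AND PROOFS =====

-- the evaluated inverted index
theorem pvKw2Cat_eq : pvKeywordToCategory = PySem.Dict.mk
    [("rewrite", "technical"), ("refactor", "technical"), ("architecture", "technical"),
     ("framework", "technical"), ("language", "technical"), ("platform", "technical"),
     ("workflow", "process"), ("pipeline", "process"), ("methodology", "process"),
     ("approach", "process"), ("strategy", "process"), ("paradigm", "process"),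
     ("pivot", "market"), ("market", "market"), ("customer", "market"),
     ("audience", "market"), ("positioning", "market"), ("segment", "market"),
     ("limitation", "capability"), ("gap", "capability"), ("missing", "capability"),
     ("unable", "capability"), ("insufficient", "capability"), ("inadequate", "capability")] := by
  decide

-- lookup in the inverted index succeeds with category c iff the word is one of c's keywords
theorem pvAssoc_get (l : List (String × String)) (w c : String)
    (hnd : (l.map Prod.fst).Nodup) :
    Option.map Prod.snd (List.find? (fun p => p.1 == w) l) = some c ↔ (w, c) ∈ l := by
  induction l with
  | nil => simp
  | cons p rest ih =>
    obtain ⟨k, v⟩ := p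
    simp only [List.map_cons, List.nodup_cons] at hnd
    by_cases hk : k = w
    · subst hk
      rw [List.find?_cons_of_pos (by simp)]
      simp only [Option.map_some, Option.some_inj, List.mem_cons, Prod.mk.injEq, true_and]
      constructor
      · intro hv; exact Or.inl hv.symm
      · rintro (rfl | hm)
        · rfl
        · exact absurd (List.mem_map_of_mem (f := Prod.fst) hm) hnd.1
    · rw [List.find?_cons_of_neg (by simpa using hk)]
      rw [ih hnd.2]
      simp only [List.mem_cons, Prod.mk.injEq]
      constructor
      · exact Or.inr
      · rintro (⟨hwk, _⟩ | hm)
        · exact absurd hwk.symm hk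
        · exact hm

theorem pvGet?_iff (w c : String) (kws : List String)
    (h : (c, kws) ∈ pvShiftCategories) :
    PySem.Dict.get? pvKeywordToCategory w = some c ↔ w ∈ kws := by
  rw [pvKw2Cat_eq]
  rw [show ∀ (l : List (String × String)), PySem.Dict.get? (PySem.Dict.mk l) w
        = Option.map Prod.snd (List.find? (fun p => p.1 == w) l) from fun l => rfl]
  rw [pvAssoc_get _ _ _ (by decide)]
  simp only [pvShiftCategories, List.mem_cons, List.not_mem_nil, or_false,
    Prod.mk.injEq] at h
  rcases h with ⟨rfl, rfl⟩ | ⟨rfl, rfl⟩ | ⟨rfl, rfl⟩ | ⟨rfl, rfl⟩ <;> simp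

-- membership in the accumulated `detected` set
theorem pvMem_detected (ws : List String) (s : PySem.Set String) (c : String) :
    c ∈ ws.foldl
      (fun s w =>
        match PySem.Dict.get? pvKeywordToCategory w with
        | some cc => PySem.Set.add s cc
        | none => s) s
      ↔ c ∈ s ∨ ∃ w ∈ ws, PySem.Dict.get? pvKeywordToCategory w = some c := by
  induction ws generalizing s with
  | nil => simp
  | cons w ws ih =>
    simp only [List.foldl_cons]
    cases hg : PySem.Dict.get? pvKeywordToCategory w with
    | none => rw [ih]; simp [hg]
    | some cc =>
      rw [ih]
      simp only [PySem.Set.mem_add, List.mem_cons]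
      constructor
      · rintro (⟨h | h⟩ | ⟨x, hx, hh⟩)
        · exact Or.inl h
        · exact Or.inr ⟨w, Or.inl rfl, h ▸ hg⟩
        · exact Or.inr ⟨x, Or.inr hx, hh⟩
      · rintro (h | ⟨x, (rfl | hx), hh⟩)
        · exact Or.inl (Or.inl h)
        · exact Or.inl (Or.inr (by rw [hg] at hh; exact (Option.some_inj.mp hh).symm))
        · exact Or.inr ⟨x, hx, hh⟩

-- per-category boolean agreement
theorem pvBool_eq (ws : List String) (c : String) (kws : List String)
    (h : (c, kws) ∈ pvShiftCategories) :
    (!(PySem.Set.inter (PySem.Set.ofList ws) kws).isEmpty)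
      = PySem.Set.contains
          (ws.foldl
            (fun s w =>
              match PySem.Dict.get? pvKeywordToCategory w with
              | some cc => PySem.Set.add s cc
              | none => s) PySem.Set.empty) c := by
  rw [Bool.eq_iff_iff]
  simp only [Bool.not_eq_true', PySem.Set.contains, List.contains_iff_mem,
    List.isEmpty_eq_false_iff_exists_mem]
  rw [pvMem_detected]
  constructor
  · rintro ⟨x, hx⟩
    rw [PySem.Set.inter] at hx
    simp only [List.mem_filter, PySem.Set.mem_ofList, PySem.Set.contains,
      List.contains_iff_mem] at hx
    exact Or.inr ⟨x, hx.1, (pvGet?_iff x c kws h).mpr hx.2⟩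
  · rintro (h0 | ⟨w, hw, hh⟩)
    · simp [PySem.Set.empty] at h0
    · refine ⟨w, ?_⟩
      rw [PySem.Set.inter]
      simp only [List.mem_filter, PySem.Set.mem_ofList, PySem.Set.contains,
        List.contains_iff_mem]
      exact ⟨hw, (pvGet?_iff w c kws h).mp hh⟩

-- ===== VERDICT (by name: the statement is the Claim_ definition above) =====
theorem classify_failure_patterns_spec : Claim_equal_classify_failure_patterns := by
  intro frs _
  show _ = _
  by_cases hne : frs = []
  · subst hne; decide
  · unfold classify_failure_patterns classify_failure_patterns_alt
    simp only [if_neg hne]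
    generalize (PySem.Str.split₀ (PySem.Str.join " " (frs.map (fun r => PySem.Str.lower r)))) = ws
    simp only [pvShiftCategories, List.foldl_cons, List.foldl_nil, List.map_cons, List.map_nil,
      List.filter_cons, List.filter_nil]
    rw [pvBool_eq ws "technical" ["rewrite", "refactor", "architecture", "framework", "language", "platform"] (by decide),
        pvBool_eq ws "process" ["workflow", "pipeline", "methodology", "approach", "strategy", "paradigm"] (by decide),
        pvBool_eq ws "market" ["pivot", "market", "customer", "audience", "positioning", "segment"] (by decide),
        pvBool_eq ws "capability" ["limitation", "gap", "missing", "unable", "insufficient", "inadequate"] (by decide)]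
    split_ifs <;> rfl
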